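-- pv_equiv track=rewrite | github.com/KirsVon/DQN-Master | DQN-master/test/test_TGOA.py | get_time_zone
-- ===== SOURCE A (Python) =====
-- def get_time_zone(start_time: int):
--     minute = (start_time // 100) % 100
--     while (minute != 0 and minute != 20 and minute != 40):
--         minute -= 1
--     hour = (start_time) // 10000
--     if minute < 10:
--         minute = "0" + str(minute)
--     if hour < 10:
--         hour = "0" + str(hour)
--     return str(hour) + str(minute)
-- ===== SOURCE B (Python) =====
-- def get_time_zone(start_time: int):
--     minute = min((start_time // 100) % 100 // 20 * 20, 40)
--     hour = start_time // 10000
--     h = str(hour) if hour >= 10 else "0" + str(hour)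
--     m = str(minute) if minute >= 10 else "0" + str(minute)
--     return h + m
-- ===== Notes on version B (the rewrite author's own statement) =====
-- stated objective: simpler
-- what changed: The decrement-until-breakpoint while loop is replaced by a closed-form capped floor-division expression, turning an iterative countdown into direct arithmetic.
import Mathlib
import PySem

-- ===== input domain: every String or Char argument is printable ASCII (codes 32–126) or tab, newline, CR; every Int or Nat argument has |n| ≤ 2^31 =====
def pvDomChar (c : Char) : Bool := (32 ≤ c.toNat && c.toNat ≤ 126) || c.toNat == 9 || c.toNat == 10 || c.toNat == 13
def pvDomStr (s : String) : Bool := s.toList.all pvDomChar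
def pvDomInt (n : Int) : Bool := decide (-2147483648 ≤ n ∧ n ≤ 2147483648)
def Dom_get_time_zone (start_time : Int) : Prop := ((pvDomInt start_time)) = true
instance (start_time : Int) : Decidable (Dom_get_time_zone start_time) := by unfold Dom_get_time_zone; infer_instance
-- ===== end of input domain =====

-- B replaces A's decrement-until-breakpoint while loop by the closed form min(minute // 20 * 20, 40) (simpler).

-- ===== PORT A =====
-- the while loop: decrement minute until it is 0, 20 or 40.  The 'm < 0' branch is a
-- totality guard only (Python would not terminate there); at the call site m ∈ [0,99].
def pvWhileA (m : Int) : Int :=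
  if m ≠ 0 ∧ m ≠ 20 ∧ m ≠ 40 then
    if m < 0 then m else pvWhileA (m - 1)
  else m
termination_by m.toNat
decreasing_by omega

def get_time_zone (start_time : Int) : String :=
  let minute := pvWhileA (PySem.Int.mod (PySem.Int.floordiv start_time 100) 100)
  let hour := PySem.Int.floordiv start_time 10000
  let minuteS := if minute < 10 then "0" ++ PySem.Int.toStr minute else PySem.Int.toStr minute
  let hourS := if hour < 10 then "0" ++ PySem.Int.toStr hour else PySem.Int.toStr hour
  hourS ++ minuteS

-- ===== PORT B =====
def get_time_zone_alt (start_time : Int) : String :=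
  let minute := min (PySem.Int.floordiv (PySem.Int.mod (PySem.Int.floordiv start_time 100) 100) 20 * 20) 40
  let hour := PySem.Int.floordiv start_time 10000
  let h := if hour ≥ 10 then PySem.Int.toStr hour else "0" ++ PySem.Int.toStr hour
  let m := if minute ≥ 10 then PySem.Int.toStr minute else "0" ++ PySem.Int.toStr minute
  h ++ m

-- ===== PRECONDITION & SPEC =====
def Spec_get_time_zone (start_time : Int) (out : String) : Prop := out = get_time_zone_alt start_time
instance (start_time : Int) (out : String) : Decidable (Spec_get_time_zone start_time out) := by unfold Spec_get_time_zone; infer_instance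

-- ===== CLAIM (what is proved, stated in full; the proofs are below) =====
def Claim_equal_get_time_zone : Prop := ∀ (start_time : Int), Dom_get_time_zone start_time → Spec_get_time_zone start_time (get_time_zone start_time)

-- ===== LEMMAS AND PROOFS =====

-- one step of the loop, for later rewriting
theorem pvWhileA_eq (m : Int) :
    pvWhileA m = if m ≠ 0 ∧ m ≠ 20 ∧ m ≠ 40 then (if m < 0 then m else pvWhileA (m - 1)) else m := by
  rw [pvWhileA]

-- the loop, started at a breakpoint k plus n < the distance to the next breakpoint, returns k
theorem pvWhileA_const (n : Nat) :
    ∀ k : Int, (k = 0 ∨ k = 20 ∨ k = 40) → ((k = 40 ∧ n < 60) ∨ n < 20) →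
      pvWhileA (k + n) = k := by
  induction n with
  | zero =>
      intro k hk _
      rw [pvWhileA_eq]
      rcases hk with h | h | h <;> simp [h]
  | succ n ih =>
      intro k hk hn
      rw [pvWhileA_eq]
      have hne : (k + (n + 1 : Nat) ≠ 0 ∧ k + (n + 1 : Nat) ≠ 20 ∧ k + (n + 1 : Nat) ≠ 40) := by
        rcases hk with h | h | h <;> subst h <;> push_cast <;> omega
      have hpos : ¬ (k + (n + 1 : Nat) < 0) := by rcases hk with h | h | h <;> omega
      have hstep : k + ((n : Nat) + 1 : Nat) - 1 = k + (n : Nat) := by push_cast; ring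
      rw [if_pos hne, if_neg hpos, hstep]
      exact ih k hk (by rcases hn with ⟨h1, h2⟩ | h <;> omega)

-- closed form of the loop on [0, 100)
theorem pvWhileA_closed (m : Int) (h0 : 0 ≤ m) (h1 : m < 100) :
    pvWhileA m = min (PySem.Int.floordiv m 20 * 20) 40 := by
  have hfd : PySem.Int.floordiv m 20 = m / 20 := PySem.Int.floordiv_eq_ediv_of_pos (by omega)
  rw [hfd]
  rcases lt_or_ge m 20 with hm | hm
  · have : m = (0 : Int) + (m.toNat : Int) := by omega
    rw [this, pvWhileA_const m.toNat 0 (by left; rfl) (by right; omega)]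
    omega
  · rcases lt_or_ge m 40 with hm2 | hm2
    · have : m = (20 : Int) + ((m - 20).toNat : Int) := by omega
      rw [this, pvWhileA_const (m - 20).toNat 20 (by right; left; rfl) (by right; omega)]
      omega
    · have : m = (40 : Int) + ((m - 40).toNat : Int) := by omega
      rw [this, pvWhileA_const (m - 40).toNat 40 (by right; right; rfl) (by left; constructor <;> omega)]
      omega

-- ===== VERDICT (by name: the statement is the Claim_ definition above) =====
theorem get_time_zone_spec : Claim_equal_get_time_zone := by
  intro start_time _
  unfold Spec_get_time_zone get_time_zone get_time_zone_alt
  have hmod : PySem.Int.mod (PySem.Int.floordiv start_time 100) 100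
      = (PySem.Int.floordiv start_time 100) % 100 :=
    PySem.Int.mod_eq_emod_of_pos (by omega)
  set x := PySem.Int.floordiv start_time 100 with hx
  have h0 : 0 ≤ x % 100 := Int.emod_nonneg x (by omega)
  have h1 : x % 100 < 100 := Int.emod_lt_of_pos x (by omega)
  rw [hmod, pvWhileA_closed (x % 100) h0 h1]
  simp only [ge_iff_le]
  split_ifs <;> first | rfl | omega
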